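-- pv_equiv track=rewrite | github.com/jfpio/ConnectFour | ConnectFourGame/model/ai/get_valid_moves.py | get_order_for_even
-- ===== SOURCE A (Python) =====
-- def get_order_for_even(board):
--     columns_number = len(board[0])
--     order = []
--     left_middle = int(columns_number / 2) - 1
--     right_middle = left_middle + 1
--     for i in range(right_middle):
--         order.append(left_middle)
--         order.append(right_middle)
--         left_middle -= 1
--         right_middle += 1
--     return order
-- ===== SOURCE B (Python) =====
-- def get_order_for_even(board):
--     m = len(board[0]) // 2
--     # sort the 2*m playable columns by their distance from the board's center
--     # line (between columns m-1 and m); the left column of each equidistant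
--     # pair comes first because it is the smaller index
--     return sorted(range(2 * m), key=lambda c: (abs(2 * c + 1 - 2 * m), c))
-- ===== Notes on version B (the rewrite author's own statement) =====
-- stated objective: alternative
-- what changed: Replaces A's loop that mutates two moving cursors and appends pairs with a sort: the 2*(n//2) playable columns are sorted by (distance from the board's center line, column index).
-- outside the precondition, e.g. on get_order_for_even([]): A raises IndexError, B raises IndexError
import Mathlib
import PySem

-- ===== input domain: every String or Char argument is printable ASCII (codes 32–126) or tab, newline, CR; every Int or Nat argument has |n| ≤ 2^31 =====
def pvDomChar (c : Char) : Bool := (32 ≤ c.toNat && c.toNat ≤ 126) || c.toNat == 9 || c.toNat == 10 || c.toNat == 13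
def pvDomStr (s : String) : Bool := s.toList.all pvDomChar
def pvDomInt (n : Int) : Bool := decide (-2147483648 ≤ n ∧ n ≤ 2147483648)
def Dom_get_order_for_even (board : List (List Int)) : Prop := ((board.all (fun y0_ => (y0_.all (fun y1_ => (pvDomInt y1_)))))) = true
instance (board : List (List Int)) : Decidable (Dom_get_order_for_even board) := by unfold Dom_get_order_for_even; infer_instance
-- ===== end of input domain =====

-- B replaces A's cursor-mutating loop by a sort of the playable columns keyed by
-- distance from the board's center line. Objective: alternative; no speed claim.

-- ===== PORT A =====
-- int(columns_number / 2) equals floor division here since columns_number = len(...) ≥ 0.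
def get_order_for_even (board : List (List Int)) : List Int :=
  match PySem.List.pyGet? board 0 with
  | none => []   -- board[0] raises IndexError; excluded by Pre_
  | some row =>
    let columns_number : Int := PySem.List.len row
    let left_middle : Int := PySem.Int.floordiv columns_number 2 - 1
    let right_middle : Int := left_middle + 1
    let st := (PySem.List.pyRange 0 right_middle 1).foldl
      (fun (st : List Int × Int × Int) _ =>
        (st.1 ++ [st.2.1, st.2.2], st.2.1 - 1, st.2.2 + 1))
      ([], left_middle, right_middle)
    st.1

-- ===== PORT B =====
-- Python's tuple key (abs(...), c) compares lexicographically on ints; ported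
-- exactly as a key into the lexicographic product Int ×ₗ Int.
def get_order_for_even_alt (board : List (List Int)) : List Int :=
  match PySem.List.pyGet? board 0 with
  | none => []   -- board[0] raises IndexError; excluded by Pre_
  | some row =>
    let m : Int := PySem.Int.floordiv (PySem.List.len row) 2
    PySem.List.sorted (PySem.List.pyRange 0 (2 * m) 1)
      (fun c => (toLex (|2 * c + 1 - 2 * m|, c) : Int ×ₗ Int))

-- ===== PRECONDITION & SPEC =====
-- A (and B) raise IndexError on board = [] from board[0]; that is all Pre_ excludes.
def Pre_get_order_for_even (board : List (List Int)) : Prop := board ≠ []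
instance (board : List (List Int)) : Decidable (Pre_get_order_for_even board) := by
  unfold Pre_get_order_for_even; infer_instance
def pvWitness_get_order_for_even : List (List Int) := [[0, 0, 0, 0, 0, 0]]

def Spec_get_order_for_even (board : List (List Int)) (out : List Int) : Prop := out = get_order_for_even_alt board
instance (board : List (List Int)) (out : List Int) : Decidable (Spec_get_order_for_even board out) := by unfold Spec_get_order_for_even; infer_instance

-- ===== CLAIM =====
def Claim_equal_get_order_for_even : Prop := ∀ (board : List (List Int)), Dom_get_order_for_even board → Pre_get_order_for_even board → Spec_get_order_for_even board (get_order_for_even board)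

-- ===== LEMMAS AND PROOFS =====

-- the interleaved sequence A's loop produces, as an explicit recursion
def pvInter : Nat → Int → Int → List Int
  | 0, _, _ => []
  | k + 1, lm, rm => lm :: rm :: pvInter k (lm - 1) (rm + 1)

-- A's loop ignores the loop variable: its result depends only on the trip count.
theorem pvFoldA (l : List Int) (acc : List Int) (lm rm : Int) :
    (l.foldl
      (fun (st : List Int × Int × Int) _ =>
        (st.1 ++ [st.2.1, st.2.2], st.2.1 - 1, st.2.2 + 1))
      (acc, lm, rm)).1 = acc ++ pvInter l.length lm rm := by
  induction l generalizing acc lm rm with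
  | nil => simp [pvInter]
  | cons x xs ih =>
      simp only [List.foldl_cons, List.length_cons, pvInter, ih]
      simp

-- B's key
def pvKey (m c : Int) : Int ×ₗ Int := toLex (|2 * c + 1 - 2 * m|, c)

theorem pvKey_lt {m a b : Int}
    (h : |2 * a + 1 - 2 * m| < |2 * b + 1 - 2 * m| ∨
         (|2 * a + 1 - 2 * m| = |2 * b + 1 - 2 * m| ∧ a < b)) :
    pvKey m a < pvKey m b := by
  unfold pvKey
  rw [Prod.Lex.toLex_lt_toLex]
  exact h

-- pvInter covers a left descending block and a right ascending block
theorem pvInter_perm (k : Nat) (lm rm : Int) :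
    (pvInter k lm rm).Perm
      (PySem.List.pyRange (lm - k + 1) (lm + 1) 1 ++ PySem.List.pyRange rm (rm + k) 1) := by
  induction k generalizing lm rm with
  | zero =>
      simp [pvInter, PySem.List.pyRange_one_eq_nil (le_refl (lm + 1)),
            PySem.List.pyRange_one_eq_nil (le_refl rm)]
  | succ k ih =>
      have ih' := ih (lm - 1) (rm + 1)
      rw [show lm - 1 - (k : Int) + 1 = lm - (k : Int) from by ring,
          show lm - 1 + 1 = lm from by ring] at ih'
      simp only [pvInter]
      push_cast
      rw [show lm - ((k : Int) + 1) + 1 = lm - (k : Int) from by ring,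
          show rm + ((k : Int) + 1) = rm + 1 + (k : Int) from by ring,
          PySem.List.pyRange_one_append (lm - (k : Int)) lm (lm + 1) (by omega) (by omega),
          PySem.List.pyRange_one_cons (show rm < rm + 1 + (k : Int) by omega),
          show PySem.List.pyRange lm (lm + 1) 1 = [lm] from PySem.List.pyRange_one_singleton lm]
      refine ((ih'.cons rm).cons lm).trans ?_
      rw [show (PySem.List.pyRange (lm - (k : Int)) lm 1 ++ [lm]) ++
            rm :: PySem.List.pyRange (rm + 1) (rm + 1 + (k : Int)) 1
          = PySem.List.pyRange (lm - (k : Int)) lm 1 ++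
            lm :: rm :: PySem.List.pyRange (rm + 1) (rm + 1 + (k : Int)) 1 from by simp]
      exact ((List.perm_middle.symm.cons lm).trans List.perm_middle.symm)

-- Chain of strictly increasing keys along the tail of pvInter
theorem pvInter_chain (k : Nat) (m : Int) :
    ∀ i : Int, 0 ≤ i →
      List.IsChain (fun a b => pvKey m a < pvKey m b)
        ((m + i) :: pvInter k (m - 2 - i) (m + 1 + i)) := by
  induction k with
  | zero => intro i hi; simp [pvInter]
  | succ k ih =>
      intro i hi
      simp only [pvInter]
      rw [List.isChain_cons_cons, List.isChain_cons_cons]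
      refine ⟨?_, ?_, ?_⟩
      · apply pvKey_lt; left
        rw [abs_of_nonneg (show (0:Int) ≤ 2 * (m + i) + 1 - 2 * m by omega),
            abs_of_nonpos (show 2 * (m - 2 - i) + 1 - 2 * m ≤ (0:Int) by omega)]
        omega
      · apply pvKey_lt; right
        rw [abs_of_nonpos (show 2 * (m - 2 - i) + 1 - 2 * m ≤ (0:Int) by omega),
            abs_of_nonneg (show (0:Int) ≤ 2 * (m + 1 + i) + 1 - 2 * m by omega)]
        exact ⟨by omega, by omega⟩
      · have h := ih (i + 1) (by omega)
        rw [show m + (i + 1) = m + 1 + i from by ring,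
            show m - 2 - (i + 1) = m - 2 - i - 1 from by ring,
            show m + 1 + (i + 1) = m + 1 + i + 1 from by ring] at h
        exact h

theorem pvInter_pairwise (k : Nat) (m : Int) :
    List.Pairwise (fun a b => pvKey m a < pvKey m b) (pvInter k (m - 1) m) := by
  haveI : Trans (fun a b => pvKey m a < pvKey m b) (fun a b => pvKey m a < pvKey m b) (fun (a b : Int) => pvKey m a < pvKey m b) := ⟨fun h1 h2 => lt_trans h1 h2⟩
  rw [← List.isChain_iff_pairwise]
  cases k with
  | zero => simp [pvInter]
  | succ k =>
      simp only [pvInter]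
      rw [List.isChain_cons_cons]
      refine ⟨?_, ?_⟩
      · apply pvKey_lt; right
        rw [abs_of_nonpos (show 2 * (m - 1) + 1 - 2 * m ≤ (0:Int) by omega),
            abs_of_nonneg (show (0:Int) ≤ 2 * m + 1 - 2 * m by omega)]
        exact ⟨by omega, by omega⟩
      · have h := pvInter_chain k m 0 le_rfl
        rw [show m + (0:Int) = m from by ring, show m - 2 - (0:Int) = m - 1 - 1 from by ring,
            show m + 1 + (0:Int) = m + 1 from by ring] at h
        exact h

-- ===== VERDICT =====
theorem get_order_for_even_spec : Claim_equal_get_order_for_even := by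
  intro board _ hpre
  unfold Spec_get_order_for_even get_order_for_even get_order_for_even_alt
  match board with
  | [] => exact absurd rfl hpre
  | row :: rest =>
      have hget : PySem.List.pyGet? (row :: rest) 0 = some row := by
        simp [PySem.List.pyGet?, PySem.List.pyIdx?]
      rw [hget]
      simp only []
      set m : Int := PySem.Int.floordiv (PySem.List.len row) 2 with hm
      have hm0 : 0 ≤ m := by
        rw [hm, PySem.Int.floordiv_eq_ediv_of_pos (by norm_num)]
        exact Int.ediv_nonneg (by simp [PySem.List.len]) (by norm_num)
      rw [show m - 1 + 1 = m from by ring, pvFoldA, List.nil_append,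
          PySem.List.length_pyRange_one]
      rw [show m - 0 = m from by ring]
      have hperm : (pvInter m.toNat (m - 1) m).Perm (PySem.List.pyRange 0 (2 * m) 1) := by
        have h := pvInter_perm m.toNat (m - 1) m
        rw [Int.toNat_of_nonneg hm0,
            show m - 1 - m + 1 = (0:Int) from by ring,
            show m - 1 + 1 = m from by ring,
            show m + m = 2 * m from by ring,
            ← PySem.List.pyRange_one_append 0 m (2 * m) hm0 (by omega)] at h
        exact h
      exact (PySem.List.sorted_eq_of_perm_of_pairwise_lt _ _ _ hperm
        (pvInter_pairwise m.toNat m)).symm
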